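-- pv_equiv track=rewrite | github.com/SKALEZ-A/Personalized-medic | core/hipaa_compliance.py | _assess_breach_risk
-- ===== SOURCE A (Python) =====
-- from typing import Dict, List, Any, Optional, Tuple, Set
--
-- def _assess_breach_risk(indicators: List[str]) -> str:
--     """Assess breach risk level"""
--     high_risk_indicators = ["unauthorized_access", "large_data_export"]
--     medium_risk_indicators = ["high_frequency_access", "off_hours_access"]
--
--     if any(indicator in high_risk_indicators for indicator in indicators):
--         return "high"
--     elif any(indicator in medium_risk_indicators for indicator in indicators):
--         return "medium"
--     else:
--         return "low"
-- ===== SOURCE B (Python) =====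
-- def _assess_breach_risk(indicators):
--     """Assess breach risk level"""
--     severity = {
--         "unauthorized_access": 2,
--         "large_data_export": 2,
--         "high_frequency_access": 1,
--         "off_hours_access": 1,
--     }
--     best = 0
--     for indicator in indicators:
--         best = max(best, severity.get(indicator, 0))
--     return "high" if best == 2 else ("medium" if best == 1 else "low")
-- ===== Notes on version B (the rewrite author's own statement) =====
-- stated objective: alternative
-- what changed: Replaces the two short-circuiting any()-scans over the indicator list with a single pass that maintains a running maximum numeric severity looked up in one dict, classifying once at the end.
import Mathlib
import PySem

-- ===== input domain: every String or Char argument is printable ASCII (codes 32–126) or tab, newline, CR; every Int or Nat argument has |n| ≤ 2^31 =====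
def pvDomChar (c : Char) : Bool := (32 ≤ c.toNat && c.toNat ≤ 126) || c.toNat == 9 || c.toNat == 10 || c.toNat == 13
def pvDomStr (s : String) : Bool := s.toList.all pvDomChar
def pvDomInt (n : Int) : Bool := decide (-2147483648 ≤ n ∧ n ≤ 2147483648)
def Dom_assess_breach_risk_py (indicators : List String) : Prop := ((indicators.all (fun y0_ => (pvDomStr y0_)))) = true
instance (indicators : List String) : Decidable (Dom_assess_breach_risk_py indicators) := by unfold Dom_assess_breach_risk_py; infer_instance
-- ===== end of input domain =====

-- B replaces A's two short-circuiting any()-scans by one pass keeping a running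
-- maximum numeric severity from a dict, classified once at the end (alternative decomposition).


-- ===== PORT A =====
def assess_breach_risk_py (indicators : List String) : String :=
  let high_risk_indicators := ["unauthorized_access", "large_data_export"]
  let medium_risk_indicators := ["high_frequency_access", "off_hours_access"]
  if indicators.any (fun indicator => indicator ∈ high_risk_indicators) then
    "high"
  else if indicators.any (fun indicator => indicator ∈ medium_risk_indicators) then
    "medium"
  else
    "low"

-- ===== PORT B =====
def pvSeverity : PySem.Dict String Int :=
  PySem.Dict.ofList
    [("unauthorized_access", 2), ("large_data_export", 2),
     ("high_frequency_access", 1), ("off_hours_access", 1)]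

def assess_breach_risk_py_alt (indicators : List String) : String :=
  let best := indicators.foldl (fun best indicator => max best (pvSeverity.getD indicator 0)) 0
  if best == 2 then "high" else if best == 1 then "medium" else "low"

-- ===== PRECONDITION & SPEC =====
def Spec_assess_breach_risk_py (indicators : List String) (out : String) : Prop := out = assess_breach_risk_py_alt indicators
instance (indicators : List String) (out : String) : Decidable (Spec_assess_breach_risk_py indicators out) := by unfold Spec_assess_breach_risk_py; infer_instance

-- ===== CLAIM (what is proved, stated in full; the proofs are below) =====
def Claim_equal_assess_breach_risk_py : Prop := ∀ (indicators : List String), Dom_assess_breach_risk_py indicators → Spec_assess_breach_risk_py indicators (assess_breach_risk_py indicators)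

-- ===== LEMMAS AND PROOFS =====

-- severity as a case analysis
theorem pvSeverity_getD (i : String) :
    pvSeverity.getD i 0 =
      if i ∈ ["unauthorized_access", "large_data_export"] then 2
      else if i ∈ ["high_frequency_access", "off_hours_access"] then 1
      else 0 := by
  have hd : pvSeverity = PySem.Dict.mk
      [("unauthorized_access", 2), ("large_data_export", 2),
       ("high_frequency_access", 1), ("off_hours_access", 1)] := by decide
  by_cases h1 : i = "unauthorized_access"
  · subst h1; decide
  by_cases h2 : i = "large_data_export"
  · subst h2; decide
  by_cases h3 : i = "high_frequency_access"
  · subst h3; decide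
  by_cases h4 : i = "off_hours_access"
  · subst h4; decide
  simp [hd, PySem.Dict.getD, PySem.Dict.get?,
    Ne.symm h1, Ne.symm h2, Ne.symm h3, Ne.symm h4, h1, h2, h3, h4]

-- the running maximum equals the value A's any-chain classifies
theorem pvBest_eq (l : List String) (b : Int) (hb : 0 ≤ b) :
    l.foldl (fun best indicator => max best (pvSeverity.getD indicator 0)) b =
      if l.any (fun i => decide (i ∈ ["unauthorized_access", "large_data_export"])) then
        max b 2
      else if l.any (fun i => decide (i ∈ ["high_frequency_access", "off_hours_access"])) then
        max b 1
      else b := by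
  induction l generalizing b with
  | nil => simp
  | cons x xs ih =>
    have hb' : (0 : Int) ≤ max b (pvSeverity.getD x 0) := le_trans hb (le_max_left _ _)
    rw [List.foldl_cons, ih _ hb', List.any_cons, List.any_cons, pvSeverity_getD]
    by_cases h1 : x ∈ ["unauthorized_access", "large_data_export"] <;>
      by_cases h2 : x ∈ ["high_frequency_access", "off_hours_access"] <;>
        simp only [h1, h2, decide_true, decide_false, if_true, if_false,
          Bool.true_or, Bool.false_or] <;>
          split_ifs <;> omega

-- ===== VERDICT (by name: the statement is the Claim_ definition above) =====
theorem assess_breach_risk_py_spec : Claim_equal_assess_breach_risk_py := by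
  intro indicators _
  unfold Spec_assess_breach_risk_py assess_breach_risk_py assess_breach_risk_py_alt
  simp only [pvBest_eq _ _ le_rfl]
  split_ifs <;> simp_all
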